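-- pv_equiv track=rewrite | github.com/PriyadarshiniJagatha/Coding-Crew | Difficulty: Basic/Tywin's War Strategy/tywins-war-strategy.py | min_soldiers
-- ===== SOURCE A (Python) =====
-- def min_soldiers (a, n, k) :
--     sum=0
--     d=k
--     b=[]
--     for i in range(0,n):
--         if a[i]%k!=0:
--             p=k-(a[i]%k)
--         else:
--             p=0
--         b.append(p)
--     b.sort()
--     if n%2==0:
--         l=n//2
--     else:
--         l=(n+1)//2
--     for i in range(0,l):
--         sum=sum+b[i]
--     return sum
-- ===== SOURCE B (Python) =====
-- def _topup(x, k):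
--     r = x % k
--     return k - r if r != 0 else 0
--
--
-- def min_soldiers(a, n, k):
--     if n <= 0:
--         return 0
--     tops = [_topup(x, k) for x in a[:n]]
--     m = (n + 1) // 2
--     # quickselect-style partial selection: sum of the m smallest top-ups,
--     # without ever sorting the list
--     total = 0
--     while True:
--         if m >= len(tops):
--             return total + sum(tops)
--         pivot = tops[len(tops) // 2]
--         lt = [x for x in tops if x < pivot]
--         if m <= len(lt):
--             tops = lt
--             continue
--         gt = [x for x in tops if x > pivot]
--         eq = len(tops) - len(lt) - len(gt)
--         total += sum(lt)
--         m -= len(lt)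
--         if m <= eq:
--             return total + pivot * m
--         total += pivot * eq
--         m -= eq
--         tops = gt
-- ===== Notes on version B (the rewrite author's own statement) =====
-- stated objective: alternative
-- what changed: B replaces A's full sort followed by a prefix-sum loop with a quickselect-style partition loop that accumulates the sum of the ceil(n/2) smallest top-ups directly, so no sorted order is ever built.
import Mathlib
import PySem

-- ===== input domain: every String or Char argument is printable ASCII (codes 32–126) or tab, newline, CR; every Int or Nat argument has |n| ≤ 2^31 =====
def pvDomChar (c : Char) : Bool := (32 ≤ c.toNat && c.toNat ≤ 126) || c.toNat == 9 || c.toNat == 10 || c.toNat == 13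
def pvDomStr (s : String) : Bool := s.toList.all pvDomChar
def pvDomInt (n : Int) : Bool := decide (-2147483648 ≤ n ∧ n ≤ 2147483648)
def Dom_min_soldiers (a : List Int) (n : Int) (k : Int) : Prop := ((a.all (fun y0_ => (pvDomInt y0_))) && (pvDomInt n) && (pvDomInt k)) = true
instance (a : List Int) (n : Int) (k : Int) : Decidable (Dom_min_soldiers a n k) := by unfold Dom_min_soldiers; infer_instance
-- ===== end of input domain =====

-- B replaces A's sort-then-sum-a-prefix with a quickselect-style partition loop that sums
-- the ceil(n/2) smallest per-element top-ups directly, never building a sorted order.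


-- ===== PORT A =====
def min_soldiers (a : List Int) (n : Int) (k : Int) : Int :=
  -- sum=0; d=k; b=[]; for i in range(0,n): p = k-(a[i]%k) if a[i]%k!=0 else 0; b.append(p)
  let b : List Int := (PySem.List.pyRange 0 n 1).foldl (fun b i =>
      b ++ [if PySem.Int.mod (PySem.List.pyGetD a i 0) k ≠ 0
            then k - PySem.Int.mod (PySem.List.pyGetD a i 0) k else 0]) []
  -- b.sort()
  let b := PySem.List.sorted b (fun x => x) false
  -- l = n//2 if n%2==0 else (n+1)//2
  let l : Int := if PySem.Int.mod n 2 = 0 then PySem.Int.floordiv n 2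
                 else PySem.Int.floordiv (n + 1) 2
  -- for i in range(0,l): sum = sum + b[i]
  (PySem.List.pyRange 0 l 1).foldl (fun s i => s + PySem.List.pyGetD b i 0) 0

-- ===== PORT B =====
-- r = x % k; return k - r if r != 0 else 0
def pvTopup (x : Int) (k : Int) : Int :=
  let r := PySem.Int.mod x k
  if r ≠ 0 then k - r else 0

-- the while-loop of Source B, as recursion on the list it shrinks; the `[]` case is
-- unreachable from min_soldiers_alt (the loop keeps 1 ≤ m < len(tops))
def pvSumSmallest (tops : List Int) (m : Int) (total : Int) : Int :=
  if (tops.length : Int) ≤ m then total + tops.sum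
  else
    match tops with
    | [] => total
    | t0 :: rest =>
      let xs := t0 :: rest
      let pivot := PySem.List.pyGetD xs (PySem.Int.floordiv (xs.length : Int) 2) 0
      let lt := xs.filter (fun x => x < pivot)
      if m ≤ (lt.length : Int) then pvSumSmallest lt m total
      else
        let gt := xs.filter (fun x => pivot < x)
        let eqn : Int := (xs.length : Int) - (lt.length : Int) - (gt.length : Int)
        let total2 := total + lt.sum
        let m2 := m - (lt.length : Int)
        if m2 ≤ eqn then total2 + pivot * m2
        else pvSumSmallest gt (m2 - eqn) (total2 + pivot * eqn)
termination_by tops.length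
decreasing_by
  all_goals
    simp only [List.length_filter_lt_length_iff_exists]
    refine ⟨PySem.List.pyGetD (t0 :: rest) (PySem.Int.floordiv ((t0 :: rest).length : Int) 2) 0, ?_, by simp⟩
    apply PySem.List.pyGetD_mem
    have hlen : (t0 :: rest).length = rest.length + 1 := rfl
    constructor
    · rw [PySem.Int.floordiv_eq_ediv_of_pos (by omega)]; omega
    · rw [PySem.Int.floordiv_eq_ediv_of_pos (by omega)]; omega

def min_soldiers_alt (a : List Int) (n : Int) (k : Int) : Int :=
  if n ≤ 0 then 0
  else
    -- tops = [_topup(x, k) for x in a[:n]]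
    let tops := (PySem.List.slice a none (some n)).map (fun x => pvTopup x k)
    -- m = (n + 1) // 2; then the while loop with total = 0
    pvSumSmallest tops (PySem.Int.floordiv (n + 1) 2) 0

-- ===== PRECONDITION & SPEC =====
-- A raises when 0 < n and either n > len(a) (IndexError on a[i]) or k = 0 (ZeroDivisionError);
-- for n ≤ 0 neither loop body runs and A returns 0.
def Pre_min_soldiers (a : List Int) (n : Int) (k : Int) : Prop :=
  0 < n → (n ≤ (a.length : Int) ∧ k ≠ 0)
instance (a : List Int) (n : Int) (k : Int) : Decidable (Pre_min_soldiers a n k) := by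
  unfold Pre_min_soldiers; infer_instance

def pvWitness_min_soldiers : List Int × Int × Int := ([3, 7, 4, 10], 4, 5)

def Spec_min_soldiers (a : List Int) (n : Int) (k : Int) (out : Int) : Prop := out = min_soldiers_alt a n k
instance (a : List Int) (n : Int) (k : Int) (out : Int) : Decidable (Spec_min_soldiers a n k out) := by unfold Spec_min_soldiers; infer_instance

-- ===== CLAIM (what is proved, stated in full; the proofs are below) =====
def Claim_equal_min_soldiers : Prop := ∀ (a : List Int) (n : Int) (k : Int), Dom_min_soldiers a n k → Pre_min_soldiers a n k → Spec_min_soldiers a n k (min_soldiers a n k)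

-- ===== LEMMAS AND PROOFS =====

-- sorted(xs) splits at any pivot value p into sorted(<p) ++ (=p)-occurrences ++ sorted(>p)
lemma pvSorted_partition (xs : List Int) (p : Int) :
    PySem.List.sorted xs (fun x => x) false =
      PySem.List.sorted (xs.filter (fun x => x < p)) (fun x => x) false
      ++ xs.filter (fun x => x = p)
      ++ PySem.List.sorted (xs.filter (fun x => p < x)) (fun x => x) false := by
  apply PySem.List.sorted_id_eq_of_perm_of_pairwise
  · rw [List.perm_iff_count]
    intro v
    have hs1 := (PySem.List.sorted_perm (xs.filter (fun x => x < p)) (fun x => x) false).count_eq v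
    have hs2 := (PySem.List.sorted_perm (xs.filter (fun x => p < x)) (fun x => x) false).count_eq v
    rw [List.count_append, List.count_append, hs1, hs2]
    have hz : ∀ (q : Int → Bool), q v = false → List.count v (xs.filter q) = 0 := by
      intro q hq
      rw [List.count_eq_zero]
      intro hv
      rw [List.mem_filter] at hv
      simp [hq] at hv
    rcases lt_trichotomy v p with h | h | h
    · rw [List.count_filter (by simp [h]), hz _ (by simp; omega), hz _ (by simp; omega)]; omega
    · rw [hz _ (by simp; omega), List.count_filter (by simp [h]), hz _ (by simp; omega)]; omega
    · rw [hz _ (by simp; omega), hz _ (by simp; omega), List.count_filter (by simp [h])]; omega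
  · rw [List.pairwise_append]
    refine ⟨?_, PySem.List.sorted_pairwise _ _, ?_⟩
    · rw [List.pairwise_append]
      refine ⟨PySem.List.sorted_pairwise _ _, List.pairwise_of_forall_mem_list ?_, ?_⟩
      · intro x hx y hy
        rw [List.mem_filter] at hx hy
        have hx' : x = p := by simpa using hx.2
        have hy' : y = p := by simpa using hy.2
        omega
      · intro x hx y hy
        rw [PySem.List.mem_sorted, List.mem_filter] at hx
        rw [List.mem_filter] at hy
        have hx' : x < p := by simpa using hx.2
        have hy' : y = p := by simpa using hy.2
        omega
    · intro x hx y hy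
      rw [PySem.List.mem_sorted, List.mem_filter] at hy
      have hy' : p < y := by simpa using hy.2
      rcases List.mem_append.1 hx with hx | hx
      · rw [PySem.List.mem_sorted, List.mem_filter] at hx
        have : x < p := by simpa using hx.2
        omega
      · rw [List.mem_filter] at hx
        have : x = p := by simpa using hx.2
        omega

-- sum of a prefix of a constant list
lemma pvSum_take_const (l : List Int) (p : Int) (j : Nat) (hall : ∀ x ∈ l, x = p) (hj : j ≤ l.length) :
    (l.take j).sum = p * j := by
  induction j generalizing l with
  | zero => simp
  | succ j ih =>
    cases l with
    | nil => simp at hj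
    | cons x t =>
      rw [List.take_succ_cons, List.sum_cons, ih t (fun y hy => hall y (List.mem_cons_of_mem _ hy)) (by simpa using hj),
          hall x (List.mem_cons_self)]
      push_cast; ring

lemma pvFilter_len_partition (xs : List Int) (p : Int) :
    xs.length = (xs.filter (fun x => x < p)).length + (xs.filter (fun x => x = p)).length
      + (xs.filter (fun x => p < x)).length := by
  have := (pvSorted_partition xs p) ▸ PySem.List.length_sorted xs (fun x => x) false
  simp only [List.length_append, PySem.List.length_sorted] at this
  omega

-- the partition loop computes the sum of the m smallest elements (= sum of a sorted prefix)
lemma pvSumSmallest_eq (N : Nat) (xs : List Int) (m t : Int) (hx : xs.length ≤ N) (hm : 0 ≤ m) :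
    pvSumSmallest xs m t = t + ((PySem.List.sorted xs (fun x => x) false).take m.toNat).sum := by
  induction N generalizing xs m t with
  | zero =>
    have : xs = [] := List.length_eq_zero_iff.1 (by omega)
    subst this
    rw [pvSumSmallest.eq_def, (PySem.List.sorted_eq_nil_iff ([] : List Int) (fun x => x) false).2 rfl]
    simp
  | succ N ih =>
    cases xs with
    | nil =>
      rw [pvSumSmallest.eq_def, (PySem.List.sorted_eq_nil_iff ([] : List Int) (fun x => x) false).2 rfl]
      simp
    | cons t0 rest =>
      rw [pvSumSmallest.eq_def]
      by_cases hle : ((t0 :: rest).length : Int) ≤ m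
      · rw [if_pos hle, List.take_of_length_le (by rw [PySem.List.length_sorted]; omega),
            (PySem.List.sorted_perm (t0 :: rest) (fun x => x) false).sum_eq]
      · rw [if_neg hle]
        simp only []
        set ys := t0 :: rest with hys
        set p := PySem.List.pyGetD ys (PySem.Int.floordiv (ys.length : Int) 2) 0 with hp
        set lt := ys.filter (fun x => x < p) with hlt
        set gt := ys.filter (fun x => p < x) with hgt
        set eqs := ys.filter (fun x => x = p) with heqs
        have hpart := pvFilter_len_partition ys p
        rw [← hlt, ← hgt, ← heqs] at hpart
        have hsorted := pvSorted_partition ys p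
        rw [← hlt, ← hgt, ← heqs] at hsorted
        have hmlt : m < (ys.length : Int) := by omega
        have hAlen : (PySem.List.sorted lt (fun x => x) false).length = lt.length :=
          PySem.List.length_sorted _ _ _
        have hClen : (PySem.List.sorted gt (fun x => x) false).length = gt.length :=
          PySem.List.length_sorted _ _ _
        have hltlen : lt.length < ys.length := by
          rw [hlt, List.length_filter_lt_length_iff_exists]
          refine ⟨p, ?_, by simp⟩
          apply PySem.List.pyGetD_mem
          have hlen : ys.length = rest.length + 1 := rfl
          constructor
          · rw [PySem.Int.floordiv_eq_ediv_of_pos (by omega)]; omega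
          · rw [PySem.Int.floordiv_eq_ediv_of_pos (by omega)]; omega
        have hpmem : p ∈ ys := by
          apply PySem.List.pyGetD_mem
          have hlen : ys.length = rest.length + 1 := rfl
          constructor
          · rw [PySem.Int.floordiv_eq_ediv_of_pos (by omega)]; omega
          · rw [PySem.Int.floordiv_eq_ediv_of_pos (by omega)]; omega
        have heqsne : 1 ≤ eqs.length := by
          have : p ∈ eqs := by rw [heqs, List.mem_filter]; exact ⟨hpmem, by simp⟩
          exact List.length_pos_of_mem this
        have hltsum : (PySem.List.sorted lt (fun x => x) false).sum = lt.sum :=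
          (PySem.List.sorted_perm lt (fun x => x) false).sum_eq
        by_cases hm1 : m ≤ (lt.length : Int)
        · rw [if_pos hm1, ih lt m t (by omega) hm, hsorted, List.take_append, List.take_append]
          have h1 : m.toNat - (PySem.List.sorted lt (fun x => x) false).length = 0 := by omega
          have h2 : m.toNat - ((PySem.List.sorted lt (fun x => x) false) ++ eqs).length = 0 := by
            rw [List.length_append]; omega
          rw [h1, h2]
          simp
        · rw [if_neg hm1]
          have heqtake : ∀ j : Nat, j ≤ eqs.length → ((eqs.take j).sum = p * j) := by
            intro j hj
            apply pvSum_take_const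
            · intro x hxm; rw [heqs, List.mem_filter] at hxm; simpa using hxm.2
            · exact hj
          by_cases hm2 : m - (lt.length : Int) ≤ (ys.length : Int) - (lt.length : Int) - (gt.length : Int)
          · rw [if_pos hm2, hsorted, List.take_append, List.take_append,
                List.take_of_length_le (by omega)]
            have h2 : m.toNat - ((PySem.List.sorted lt (fun x => x) false) ++ eqs).length = 0 := by
              rw [List.length_append]; omega
            rw [h2]
            simp only [List.take_zero, List.append_nil, List.sum_append, hltsum, hAlen]
            rw [heqtake (m.toNat - lt.length) (by omega)]
            have hcast : ((m.toNat - lt.length : Nat) : Int) = m - (lt.length : Int) := by omega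
            rw [hcast]
            ring
          · have hE : (ys.length : Int) - (lt.length : Int) - (gt.length : Int) = (eqs.length : Int) := by omega
            rw [if_neg hm2, hsorted, List.take_append, List.take_append,
                List.take_of_length_le (show (PySem.List.sorted lt (fun x => x) false).length ≤ m.toNat by omega),
                List.take_of_length_le (show eqs.length ≤ m.toNat - (PySem.List.sorted lt (fun x => x) false).length by omega)]
            rw [ih gt (m - (lt.length : Int) - ((ys.length : Int) - (lt.length : Int) - (gt.length : Int)))
               (t + lt.sum + p * ((ys.length : Int) - (lt.length : Int) - (gt.length : Int))) (by omega) (by omega)]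
            have hsumeqs : eqs.sum = p * eqs.length := by
              have := heqtake eqs.length le_rfl
              simpa using this
            have harg : (m - (lt.length : Int) - ((ys.length : Int) - (lt.length : Int) - (gt.length : Int))).toNat
                = m.toNat - ((PySem.List.sorted lt fun x => x) ++ eqs).length := by
              rw [List.length_append]; omega
            rw [harg]
            simp only [List.sum_append, hltsum, hsumeqs, hE]
            ring

-- A's first loop builds the list of top-ups of the first n elements
lemma pvLoop1 (a : List Int) (n k : Int) (hn : n ≤ (a.length : Int)) :
    (PySem.List.pyRange 0 n 1).foldl (fun b i =>
      b ++ [if PySem.Int.mod (PySem.List.pyGetD a i 0) k ≠ 0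
            then k - PySem.Int.mod (PySem.List.pyGetD a i 0) k else 0]) []
    = (a.take n.toNat).map (fun x => pvTopup x k) := by
  rw [PySem.List.foldl_append_singleton_eq_map
      (fun i => if PySem.Int.mod (PySem.List.pyGetD a i 0) k ≠ 0
                then k - PySem.Int.mod (PySem.List.pyGetD a i 0) k else 0), List.nil_append,
      PySem.List.pyRange_one]
  rw [List.map_map]
  apply List.ext_getElem
  · simp; omega
  · intro i h1 h2
    simp only [List.getElem_map, List.getElem_range, Function.comp_apply, List.getElem_take]
    have hi : (i : Int) < n := by simp at h1; omega
    have hia : i < a.length := by simp at h1; omega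
    rw [show ((0 : Int) + (i : Int)) = ((i : Nat) : Int) by omega,
        PySem.List.pyGetD_natCast, List.getD_eq_getElem a 0 hia]
    rfl

-- A's second loop sums the first m entries of xs
lemma pvLoop2 (xs : List Int) (m : Nat) (hm : m ≤ xs.length) :
    (PySem.List.pyRange 0 (m : Int) 1).foldl (fun s i => s + PySem.List.pyGetD xs i 0) 0
    = (xs.take m).sum := by
  induction m with
  | zero => simp [PySem.List.pyRange_one_eq_nil]
  | succ j ih =>
    rw [show ((j + 1 : Nat) : Int) = ((j : Nat) : Int) + 1 by push_cast; ring,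
        PySem.List.pyRange_one_succ_right (by omega), List.foldl_append, ih (by omega)]
    simp only [List.foldl_cons, List.foldl_nil, PySem.List.pyGetD_natCast]
    rw [List.getD_eq_getElem xs 0 (by omega), List.sum_take_succ xs j (by omega)]

-- ===== VERDICT (by name: the statement is the Claim_ definition above) =====
theorem min_soldiers_spec : Claim_equal_min_soldiers := by
  intro a n k _ hpre
  unfold Spec_min_soldiers min_soldiers min_soldiers_alt
  by_cases hn : n ≤ 0
  · rw [if_pos hn]
    simp only [PySem.List.pyRange_one_eq_nil hn, List.foldl_nil,
        (PySem.List.sorted_eq_nil_iff ([] : List Int) (fun x => x) false).2 rfl]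
    have hL : ∀ (l : Int), l ≤ 0 →
        (PySem.List.pyRange 0 l 1).foldl (fun s i => s + PySem.List.pyGetD ([] : List Int) i 0) 0 = 0 := by
      intro l hl
      rw [PySem.List.pyRange_one_eq_nil hl]
      rfl
    split_ifs with h
    · apply hL; rw [PySem.Int.floordiv_eq_ediv_of_pos (by omega)]; omega
    · apply hL; rw [PySem.Int.floordiv_eq_ediv_of_pos (by omega)]; omega
  · rw [if_neg hn]
    obtain ⟨hlen, hk⟩ := hpre (by omega)
    rw [pvLoop1 a n k hlen, PySem.List.slice_to a (by omega : (0:Int) ≤ n)]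
    set tops := (a.take n.toNat).map (fun x => pvTopup x k) with htops
    have htlen : tops.length = n.toNat := by
      rw [htops, List.length_map, List.length_take]; omega
    have hLeq : (if PySem.Int.mod n 2 = 0 then PySem.Int.floordiv n 2
                 else PySem.Int.floordiv (n + 1) 2) = PySem.Int.floordiv (n + 1) 2 := by
      split_ifs with h
      · rw [PySem.Int.mod_eq_emod_of_pos (by omega)] at h
        rw [PySem.Int.floordiv_eq_ediv_of_pos (by omega), PySem.Int.floordiv_eq_ediv_of_pos (by omega)]
        omega
      · rfl
    rw [hLeq]
    set L := PySem.Int.floordiv (n + 1) 2 with hLdef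
    have hL0 : 0 ≤ L := by rw [hLdef, PySem.Int.floordiv_eq_ediv_of_pos (by omega)]; omega
    have hLn : L ≤ n := by rw [hLdef, PySem.Int.floordiv_eq_ediv_of_pos (by omega)]; omega
    have h2 := pvLoop2 (PySem.List.sorted tops (fun x => x) false) L.toNat
        (by rw [PySem.List.length_sorted]; omega)
    rw [show ((L.toNat : Nat) : Int) = L by omega] at h2
    rw [h2, pvSumSmallest_eq tops.length tops L 0 le_rfl hL0]
    ring
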